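-- pv_equiv track=rewrite | github.com/erardn-web/36.9-Bilans | utils/sf36.py | _recode
-- ===== SOURCE A (Python) =====
-- def _recode(key, val):
--     """Recodage selon la grille officielle SF-36 (RAND scoring)."""
--     # Items à inverser ou recoder
--     recode_map = {
--         # Q1 : 1→100, 2→75, 3→50, 4→25, 5→0
--         "q1":  {1: 100, 2: 75, 3: 50, 4: 25, 5: 0},
--         # Q2 (non inclus dans les 8 dimensions)
--         "q2":  {1: 100, 2: 75, 3: 50, 4: 25, 5: 0},
--         # Q3a–j : 1→0, 2→50, 3→100
--         **{f"q3{x}": {1: 0, 2: 50, 3: 100}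
--            for x in "abcdefghij"},
--         # Q4a–d : 2(oui)→0, 1(non)→100  (items de limitation)
--         **{f"q4{x}": {2: 0, 1: 100} for x in "abcd"},
--         # Q5a–c : 2(oui)→0, 1(non)→100
--         **{f"q5{x}": {2: 0, 1: 100} for x in "abc"},
--         # Q6 : 1→100, 2→75, 3→50, 4→25, 5→0
--         "q6":  {1: 100, 2: 75, 3: 50, 4: 25, 5: 0},
--         # Q7 : 1→100, 2→80, 3→60, 4→40, 5→20, 6→0
--         "q7":  {1: 100, 2: 80, 3: 60, 4: 40, 5: 20, 6: 0},
--         # Q8 : 1→100, 2→75, 3→50, 4→25, 5→0  (douleur gêne travail)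
--         "q8":  {1: 100, 2: 75, 3: 50, 4: 25, 5: 0},
--         # Q9a,d,e,h : vitalité/bien-être positifs → 1→100..6→0
--         "q9a": {1: 100, 2: 80, 3: 60, 4: 40, 5: 20, 6: 0},
--         "q9d": {1: 100, 2: 80, 3: 60, 4: 40, 5: 20, 6: 0},
--         "q9e": {1: 100, 2: 80, 3: 60, 4: 40, 5: 20, 6: 0},
--         "q9h": {1: 100, 2: 80, 3: 60, 4: 40, 5: 20, 6: 0},
--         # Q9b,c,f,g,i : négatifs → 1→0..6→100
--         "q9b": {1: 0, 2: 20, 3: 40, 4: 60, 5: 80, 6: 100},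
--         "q9c": {1: 0, 2: 20, 3: 40, 4: 60, 5: 80, 6: 100},
--         "q9f": {1: 0, 2: 20, 3: 40, 4: 60, 5: 80, 6: 100},
--         "q9g": {1: 0, 2: 20, 3: 40, 4: 60, 5: 80, 6: 100},
--         "q9i": {1: 0, 2: 20, 3: 40, 4: 60, 5: 80, 6: 100},
--         # Q10 : 1→0, 2→25, 3→50, 4→75, 5→100
--         "q10": {1: 0, 2: 25, 3: 50, 4: 75, 5: 100},
--         # Q11a,c : négatifs → 1→0..5→100
--         "q11a": {1: 0, 2: 25, 3: 50, 4: 75, 5: 100},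
--         "q11c": {1: 0, 2: 25, 3: 50, 4: 75, 5: 100},
--         # Q11b,d : positifs → 1→100..5→0
--         "q11b": {1: 100, 2: 75, 3: 50, 4: 25, 5: 0},
--         "q11d": {1: 100, 2: 75, 3: 50, 4: 25, 5: 0},
--     }
--     if val is None or val == "":
--         return None
--     mapping = recode_map.get(key)
--     if mapping:
--         return mapping.get(int(val))
--     return None
-- ===== SOURCE B (Python) =====
-- # B: closed-form arithmetic per item group instead of per-key value dictionaries.
-- DESC5 = {"q1", "q2", "q6", "q8", "q11b", "q11d"}
-- ASC5 = {"q10", "q11a", "q11c"}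
-- THREE = {f"q3{x}" for x in "abcdefghij"}
-- BINARY = {f"q4{x}" for x in "abcd"} | {f"q5{x}" for x in "abc"}
-- POS6 = {"q7", "q9a", "q9d", "q9e", "q9h"}
-- NEG6 = {"q9b", "q9c", "q9f", "q9g", "q9i"}
--
--
-- def _recode(key, val):
--     if val is None or val == "":
--         return None
--     v = int(val)
--     if key in DESC5:
--         return (5 - v) * 25 if 1 <= v <= 5 else None
--     if key in ASC5:
--         return (v - 1) * 25 if 1 <= v <= 5 else None
--     if key in THREE:
--         return (v - 1) * 50 if 1 <= v <= 3 else None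
--     if key in BINARY:
--         return 100 if v == 1 else (0 if v == 2 else None)
--     if key in POS6:
--         return (6 - v) * 20 if 1 <= v <= 6 else None
--     if key in NEG6:
--         return (v - 1) * 20 if 1 <= v <= 6 else None
--     return None
-- ===== Notes on version B (the rewrite author's own statement) =====
-- stated objective: simpler
-- what changed: Replaces the big per-key dict-of-dicts lookup by six item-group membership sets and one closed-form arithmetic formula per group (with explicit range checks yielding None).
import Mathlib
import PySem

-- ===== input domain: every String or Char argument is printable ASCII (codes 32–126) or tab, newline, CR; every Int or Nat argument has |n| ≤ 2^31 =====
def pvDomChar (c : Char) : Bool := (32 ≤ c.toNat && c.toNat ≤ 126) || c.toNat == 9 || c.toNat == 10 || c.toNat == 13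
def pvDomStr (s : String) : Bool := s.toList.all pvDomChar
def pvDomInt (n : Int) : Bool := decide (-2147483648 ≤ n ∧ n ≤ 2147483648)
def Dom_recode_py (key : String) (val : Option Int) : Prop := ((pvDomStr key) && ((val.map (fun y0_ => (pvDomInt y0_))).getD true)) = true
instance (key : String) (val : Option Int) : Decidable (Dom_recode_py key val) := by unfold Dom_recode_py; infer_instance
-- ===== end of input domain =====

-- B replaces A's per-key value dictionaries by closed-form arithmetic per item group (objective: simpler).

-- ===== PORT A =====
-- The repeated Python dict literals / comprehension-generated dicts (identical per group):
def tabDesc5 : PySem.Dict Int Int := PySem.Dict.ofList [(1, 100), (2, 75), (3, 50), (4, 25), (5, 0)]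
def tabThree : PySem.Dict Int Int := PySem.Dict.ofList [(1, 0), (2, 50), (3, 100)]
def tabBin   : PySem.Dict Int Int := PySem.Dict.ofList [(2, 0), (1, 100)]
def tabPos6  : PySem.Dict Int Int := PySem.Dict.ofList [(1, 100), (2, 80), (3, 60), (4, 40), (5, 20), (6, 0)]
def tabNeg6  : PySem.Dict Int Int := PySem.Dict.ofList [(1, 0), (2, 20), (3, 40), (4, 60), (5, 80), (6, 100)]
def tabAsc5  : PySem.Dict Int Int := PySem.Dict.ofList [(1, 0), (2, 25), (3, 50), (4, 75), (5, 100)]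

-- recode_map, the comprehensions ("q3a"…"q3j", "q4a"…"q4d", "q5a"…"q5c") unrolled to their literal entries
def recodeMap : PySem.Dict String (PySem.Dict Int Int) := PySem.Dict.ofList
  [ ("q1", tabDesc5), ("q2", tabDesc5),
    ("q3a", tabThree), ("q3b", tabThree), ("q3c", tabThree), ("q3d", tabThree), ("q3e", tabThree),
    ("q3f", tabThree), ("q3g", tabThree), ("q3h", tabThree), ("q3i", tabThree), ("q3j", tabThree),
    ("q4a", tabBin), ("q4b", tabBin), ("q4c", tabBin), ("q4d", tabBin),
    ("q5a", tabBin), ("q5b", tabBin), ("q5c", tabBin),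
    ("q6", tabDesc5), ("q7", tabPos6), ("q8", tabDesc5),
    ("q9a", tabPos6), ("q9d", tabPos6), ("q9e", tabPos6), ("q9h", tabPos6),
    ("q9b", tabNeg6), ("q9c", tabNeg6), ("q9f", tabNeg6), ("q9g", tabNeg6), ("q9i", tabNeg6),
    ("q10", tabAsc5), ("q11a", tabAsc5), ("q11c", tabAsc5),
    ("q11b", tabDesc5), ("q11d", tabDesc5) ]

-- val == "" is always False for an int val, so the guard reduces to the None test
def recode_py (key : String) (val : Option Int) : Option Int :=
  match val with
  | none => none
  | some v =>
    match recodeMap.get? key with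
    | some mapping => if mapping.size ≠ 0 then mapping.get? v else none
    | none => none

-- ===== PORT B =====
def pvDESC5 : List String := ["q1", "q2", "q6", "q8", "q11b", "q11d"]
def pvASC5 : List String := ["q10", "q11a", "q11c"]
def pvTHREE : List String := ["q3a", "q3b", "q3c", "q3d", "q3e", "q3f", "q3g", "q3h", "q3i", "q3j"]
def pvBINARY : List String := ["q4a", "q4b", "q4c", "q4d", "q5a", "q5b", "q5c"]
def pvPOS6 : List String := ["q7", "q9a", "q9d", "q9e", "q9h"]
def pvNEG6 : List String := ["q9b", "q9c", "q9f", "q9g", "q9i"]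

def recode_py_alt (key : String) (val : Option Int) : Option Int :=
  match val with
  | none => none
  | some v =>
    if key ∈ pvDESC5 then (if 1 ≤ v ∧ v ≤ 5 then some ((5 - v) * 25) else none)
    else if key ∈ pvASC5 then (if 1 ≤ v ∧ v ≤ 5 then some ((v - 1) * 25) else none)
    else if key ∈ pvTHREE then (if 1 ≤ v ∧ v ≤ 3 then some ((v - 1) * 50) else none)
    else if key ∈ pvBINARY then (if v = 1 then some 100 else if v = 2 then some 0 else none)
    else if key ∈ pvPOS6 then (if 1 ≤ v ∧ v ≤ 6 then some ((6 - v) * 20) else none)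
    else if key ∈ pvNEG6 then (if 1 ≤ v ∧ v ≤ 6 then some ((v - 1) * 20) else none)
    else none

-- ===== PRECONDITION & SPEC =====
def Spec_recode_py (key : String) (val : Option Int) (out : Option Int) : Prop := out = recode_py_alt key val
instance (key : String) (val : Option Int) (out : Option Int) : Decidable (Spec_recode_py key val out) := by unfold Spec_recode_py; infer_instance

-- ===== CLAIM (what is proved, stated in full; the proofs are below) =====
def Claim_equal_recode_py : Prop := ∀ (key : String) (val : Option Int), Dom_recode_py key val → Spec_recode_py key val (recode_py key val)

-- ===== LEMMAS AND PROOFS =====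
theorem tabDesc5_get (v : Int) : tabDesc5.get? v = if 1 ≤ v ∧ v ≤ 5 then some ((5 - v) * 25) else none := by
  by_cases g1 : v = 1; · subst g1; decide
  by_cases g2 : v = 2; · subst g2; decide
  by_cases g3 : v = 3; · subst g3; decide
  by_cases g4 : v = 4; · subst g4; decide
  by_cases g5 : v = 5; · subst g5; decide
  simp [tabDesc5, PySem.Dict.ofList, PySem.Dict.update, List.foldl, PySem.Dict.get?_insert, PySem.Dict.get?_empty, g1, g2, g3, g4, g5]
  omega

theorem tabAsc5_get (v : Int) : tabAsc5.get? v = if 1 ≤ v ∧ v ≤ 5 then some ((v - 1) * 25) else none := by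
  by_cases g1 : v = 1; · subst g1; decide
  by_cases g2 : v = 2; · subst g2; decide
  by_cases g3 : v = 3; · subst g3; decide
  by_cases g4 : v = 4; · subst g4; decide
  by_cases g5 : v = 5; · subst g5; decide
  simp [tabAsc5, PySem.Dict.ofList, PySem.Dict.update, List.foldl, PySem.Dict.get?_insert, PySem.Dict.get?_empty, g1, g2, g3, g4, g5]
  omega

theorem tabThree_get (v : Int) : tabThree.get? v = if 1 ≤ v ∧ v ≤ 3 then some ((v - 1) * 50) else none := by
  by_cases g1 : v = 1; · subst g1; decide
  by_cases g2 : v = 2; · subst g2; decide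
  by_cases g3 : v = 3; · subst g3; decide
  simp [tabThree, PySem.Dict.ofList, PySem.Dict.update, List.foldl, PySem.Dict.get?_insert, PySem.Dict.get?_empty, g1, g2, g3]
  omega

theorem tabBin_get (v : Int) : tabBin.get? v = if v = 1 then some 100 else if v = 2 then some 0 else none := by
  by_cases g1 : v = 1; · subst g1; decide
  by_cases g2 : v = 2; · subst g2; decide
  simp [tabBin, PySem.Dict.ofList, PySem.Dict.update, List.foldl, PySem.Dict.get?_insert, PySem.Dict.get?_empty, g1, g2]

theorem tabPos6_get (v : Int) : tabPos6.get? v = if 1 ≤ v ∧ v ≤ 6 then some ((6 - v) * 20) else none := by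
  by_cases g1 : v = 1; · subst g1; decide
  by_cases g2 : v = 2; · subst g2; decide
  by_cases g3 : v = 3; · subst g3; decide
  by_cases g4 : v = 4; · subst g4; decide
  by_cases g5 : v = 5; · subst g5; decide
  by_cases g6 : v = 6; · subst g6; decide
  simp [tabPos6, PySem.Dict.ofList, PySem.Dict.update, List.foldl, PySem.Dict.get?_insert, PySem.Dict.get?_empty, g1, g2, g3, g4, g5, g6]
  omega

theorem tabNeg6_get (v : Int) : tabNeg6.get? v = if 1 ≤ v ∧ v ≤ 6 then some ((v - 1) * 20) else none := by
  by_cases g1 : v = 1; · subst g1; decide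
  by_cases g2 : v = 2; · subst g2; decide
  by_cases g3 : v = 3; · subst g3; decide
  by_cases g4 : v = 4; · subst g4; decide
  by_cases g5 : v = 5; · subst g5; decide
  by_cases g6 : v = 6; · subst g6; decide
  simp [tabNeg6, PySem.Dict.ofList, PySem.Dict.update, List.foldl, PySem.Dict.get?_insert, PySem.Dict.get?_empty, g1, g2, g3, g4, g5, g6]
  omega

-- ===== VERDICT (by name: the statement is the Claim_ definition above) =====
set_option maxRecDepth 8192 in
theorem recode_py_spec : Claim_equal_recode_py := by
  intro key val _
  unfold Spec_recode_py
  rcases val with _ | v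
  · rfl
  by_cases h1 : key = "q1"
  · subst h1; unfold recode_py recode_py_alt
    rw [show recodeMap.get? "q1" = some tabDesc5 from by
      simp [recodeMap, PySem.Dict.ofList, PySem.Dict.update, List.foldl, PySem.Dict.get?_insert]]
    simp [pvDESC5, tabDesc5_get, show tabDesc5.size ≠ 0 from by decide]
  by_cases h2 : key = "q2"
  · subst h2; unfold recode_py recode_py_alt
    rw [show recodeMap.get? "q2" = some tabDesc5 from by
      simp [recodeMap, PySem.Dict.ofList, PySem.Dict.update, List.foldl, PySem.Dict.get?_insert]]
    simp [pvDESC5, tabDesc5_get, show tabDesc5.size ≠ 0 from by decide]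
  by_cases h3 : key = "q3a"
  · subst h3; unfold recode_py recode_py_alt
    rw [show recodeMap.get? "q3a" = some tabThree from by
      simp [recodeMap, PySem.Dict.ofList, PySem.Dict.update, List.foldl, PySem.Dict.get?_insert]]
    simp [pvDESC5, pvASC5, pvTHREE, tabThree_get, show tabThree.size ≠ 0 from by decide]
  by_cases h4 : key = "q3b"
  · subst h4; unfold recode_py recode_py_alt
    rw [show recodeMap.get? "q3b" = some tabThree from by
      simp [recodeMap, PySem.Dict.ofList, PySem.Dict.update, List.foldl, PySem.Dict.get?_insert]]
    simp [pvDESC5, pvASC5, pvTHREE, tabThree_get, show tabThree.size ≠ 0 from by decide]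
  by_cases h5 : key = "q3c"
  · subst h5; unfold recode_py recode_py_alt
    rw [show recodeMap.get? "q3c" = some tabThree from by
      simp [recodeMap, PySem.Dict.ofList, PySem.Dict.update, List.foldl, PySem.Dict.get?_insert]]
    simp [pvDESC5, pvASC5, pvTHREE, tabThree_get, show tabThree.size ≠ 0 from by decide]
  by_cases h6 : key = "q3d"
  · subst h6; unfold recode_py recode_py_alt
    rw [show recodeMap.get? "q3d" = some tabThree from by
      simp [recodeMap, PySem.Dict.ofList, PySem.Dict.update, List.foldl, PySem.Dict.get?_insert]]
    simp [pvDESC5, pvASC5, pvTHREE, tabThree_get, show tabThree.size ≠ 0 from by decide]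
  by_cases h7 : key = "q3e"
  · subst h7; unfold recode_py recode_py_alt
    rw [show recodeMap.get? "q3e" = some tabThree from by
      simp [recodeMap, PySem.Dict.ofList, PySem.Dict.update, List.foldl, PySem.Dict.get?_insert]]
    simp [pvDESC5, pvASC5, pvTHREE, tabThree_get, show tabThree.size ≠ 0 from by decide]
  by_cases h8 : key = "q3f"
  · subst h8; unfold recode_py recode_py_alt
    rw [show recodeMap.get? "q3f" = some tabThree from by
      simp [recodeMap, PySem.Dict.ofList, PySem.Dict.update, List.foldl, PySem.Dict.get?_insert]]
    simp [pvDESC5, pvASC5, pvTHREE, tabThree_get, show tabThree.size ≠ 0 from by decide]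
  by_cases h9 : key = "q3g"
  · subst h9; unfold recode_py recode_py_alt
    rw [show recodeMap.get? "q3g" = some tabThree from by
      simp [recodeMap, PySem.Dict.ofList, PySem.Dict.update, List.foldl, PySem.Dict.get?_insert]]
    simp [pvDESC5, pvASC5, pvTHREE, tabThree_get, show tabThree.size ≠ 0 from by decide]
  by_cases h10 : key = "q3h"
  · subst h10; unfold recode_py recode_py_alt
    rw [show recodeMap.get? "q3h" = some tabThree from by
      simp [recodeMap, PySem.Dict.ofList, PySem.Dict.update, List.foldl, PySem.Dict.get?_insert]]
    simp [pvDESC5, pvASC5, pvTHREE, tabThree_get, show tabThree.size ≠ 0 from by decide]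
  by_cases h11 : key = "q3i"
  · subst h11; unfold recode_py recode_py_alt
    rw [show recodeMap.get? "q3i" = some tabThree from by
      simp [recodeMap, PySem.Dict.ofList, PySem.Dict.update, List.foldl, PySem.Dict.get?_insert]]
    simp [pvDESC5, pvASC5, pvTHREE, tabThree_get, show tabThree.size ≠ 0 from by decide]
  by_cases h12 : key = "q3j"
  · subst h12; unfold recode_py recode_py_alt
    rw [show recodeMap.get? "q3j" = some tabThree from by
      simp [recodeMap, PySem.Dict.ofList, PySem.Dict.update, List.foldl, PySem.Dict.get?_insert]]
    simp [pvDESC5, pvASC5, pvTHREE, tabThree_get, show tabThree.size ≠ 0 from by decide]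
  by_cases h13 : key = "q4a"
  · subst h13; unfold recode_py recode_py_alt
    rw [show recodeMap.get? "q4a" = some tabBin from by
      simp [recodeMap, PySem.Dict.ofList, PySem.Dict.update, List.foldl, PySem.Dict.get?_insert]]
    simp [pvDESC5, pvASC5, pvTHREE, pvBINARY, tabBin_get, show tabBin.size ≠ 0 from by decide]
  by_cases h14 : key = "q4b"
  · subst h14; unfold recode_py recode_py_alt
    rw [show recodeMap.get? "q4b" = some tabBin from by
      simp [recodeMap, PySem.Dict.ofList, PySem.Dict.update, List.foldl, PySem.Dict.get?_insert]]
    simp [pvDESC5, pvASC5, pvTHREE, pvBINARY, tabBin_get, show tabBin.size ≠ 0 from by decide]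
  by_cases h15 : key = "q4c"
  · subst h15; unfold recode_py recode_py_alt
    rw [show recodeMap.get? "q4c" = some tabBin from by
      simp [recodeMap, PySem.Dict.ofList, PySem.Dict.update, List.foldl, PySem.Dict.get?_insert]]
    simp [pvDESC5, pvASC5, pvTHREE, pvBINARY, tabBin_get, show tabBin.size ≠ 0 from by decide]
  by_cases h16 : key = "q4d"
  · subst h16; unfold recode_py recode_py_alt
    rw [show recodeMap.get? "q4d" = some tabBin from by
      simp [recodeMap, PySem.Dict.ofList, PySem.Dict.update, List.foldl, PySem.Dict.get?_insert]]
    simp [pvDESC5, pvASC5, pvTHREE, pvBINARY, tabBin_get, show tabBin.size ≠ 0 from by decide]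
  by_cases h17 : key = "q5a"
  · subst h17; unfold recode_py recode_py_alt
    rw [show recodeMap.get? "q5a" = some tabBin from by
      simp [recodeMap, PySem.Dict.ofList, PySem.Dict.update, List.foldl, PySem.Dict.get?_insert]]
    simp [pvDESC5, pvASC5, pvTHREE, pvBINARY, tabBin_get, show tabBin.size ≠ 0 from by decide]
  by_cases h18 : key = "q5b"
  · subst h18; unfold recode_py recode_py_alt
    rw [show recodeMap.get? "q5b" = some tabBin from by
      simp [recodeMap, PySem.Dict.ofList, PySem.Dict.update, List.foldl, PySem.Dict.get?_insert]]
    simp [pvDESC5, pvASC5, pvTHREE, pvBINARY, tabBin_get, show tabBin.size ≠ 0 from by decide]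
  by_cases h19 : key = "q5c"
  · subst h19; unfold recode_py recode_py_alt
    rw [show recodeMap.get? "q5c" = some tabBin from by
      simp [recodeMap, PySem.Dict.ofList, PySem.Dict.update, List.foldl, PySem.Dict.get?_insert]]
    simp [pvDESC5, pvASC5, pvTHREE, pvBINARY, tabBin_get, show tabBin.size ≠ 0 from by decide]
  by_cases h20 : key = "q6"
  · subst h20; unfold recode_py recode_py_alt
    rw [show recodeMap.get? "q6" = some tabDesc5 from by
      simp [recodeMap, PySem.Dict.ofList, PySem.Dict.update, List.foldl, PySem.Dict.get?_insert]]
    simp [pvDESC5, tabDesc5_get, show tabDesc5.size ≠ 0 from by decide]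
  by_cases h21 : key = "q7"
  · subst h21; unfold recode_py recode_py_alt
    rw [show recodeMap.get? "q7" = some tabPos6 from by
      simp [recodeMap, PySem.Dict.ofList, PySem.Dict.update, List.foldl, PySem.Dict.get?_insert]]
    simp [pvDESC5, pvASC5, pvTHREE, pvBINARY, pvPOS6, tabPos6_get, show tabPos6.size ≠ 0 from by decide]
  by_cases h22 : key = "q8"
  · subst h22; unfold recode_py recode_py_alt
    rw [show recodeMap.get? "q8" = some tabDesc5 from by
      simp [recodeMap, PySem.Dict.ofList, PySem.Dict.update, List.foldl, PySem.Dict.get?_insert]]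
    simp [pvDESC5, tabDesc5_get, show tabDesc5.size ≠ 0 from by decide]
  by_cases h23 : key = "q9a"
  · subst h23; unfold recode_py recode_py_alt
    rw [show recodeMap.get? "q9a" = some tabPos6 from by
      simp [recodeMap, PySem.Dict.ofList, PySem.Dict.update, List.foldl, PySem.Dict.get?_insert]]
    simp [pvDESC5, pvASC5, pvTHREE, pvBINARY, pvPOS6, tabPos6_get, show tabPos6.size ≠ 0 from by decide]
  by_cases h24 : key = "q9d"
  · subst h24; unfold recode_py recode_py_alt
    rw [show recodeMap.get? "q9d" = some tabPos6 from by
      simp [recodeMap, PySem.Dict.ofList, PySem.Dict.update, List.foldl, PySem.Dict.get?_insert]]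
    simp [pvDESC5, pvASC5, pvTHREE, pvBINARY, pvPOS6, tabPos6_get, show tabPos6.size ≠ 0 from by decide]
  by_cases h25 : key = "q9e"
  · subst h25; unfold recode_py recode_py_alt
    rw [show recodeMap.get? "q9e" = some tabPos6 from by
      simp [recodeMap, PySem.Dict.ofList, PySem.Dict.update, List.foldl, PySem.Dict.get?_insert]]
    simp [pvDESC5, pvASC5, pvTHREE, pvBINARY, pvPOS6, tabPos6_get, show tabPos6.size ≠ 0 from by decide]
  by_cases h26 : key = "q9h"
  · subst h26; unfold recode_py recode_py_alt
    rw [show recodeMap.get? "q9h" = some tabPos6 from by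
      simp [recodeMap, PySem.Dict.ofList, PySem.Dict.update, List.foldl, PySem.Dict.get?_insert]]
    simp [pvDESC5, pvASC5, pvTHREE, pvBINARY, pvPOS6, tabPos6_get, show tabPos6.size ≠ 0 from by decide]
  by_cases h27 : key = "q9b"
  · subst h27; unfold recode_py recode_py_alt
    rw [show recodeMap.get? "q9b" = some tabNeg6 from by
      simp [recodeMap, PySem.Dict.ofList, PySem.Dict.update, List.foldl, PySem.Dict.get?_insert]]
    simp [pvDESC5, pvASC5, pvTHREE, pvBINARY, pvPOS6, pvNEG6, tabNeg6_get, show tabNeg6.size ≠ 0 from by decide]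
  by_cases h28 : key = "q9c"
  · subst h28; unfold recode_py recode_py_alt
    rw [show recodeMap.get? "q9c" = some tabNeg6 from by
      simp [recodeMap, PySem.Dict.ofList, PySem.Dict.update, List.foldl, PySem.Dict.get?_insert]]
    simp [pvDESC5, pvASC5, pvTHREE, pvBINARY, pvPOS6, pvNEG6, tabNeg6_get, show tabNeg6.size ≠ 0 from by decide]
  by_cases h29 : key = "q9f"
  · subst h29; unfold recode_py recode_py_alt
    rw [show recodeMap.get? "q9f" = some tabNeg6 from by
      simp [recodeMap, PySem.Dict.ofList, PySem.Dict.update, List.foldl, PySem.Dict.get?_insert]]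
    simp [pvDESC5, pvASC5, pvTHREE, pvBINARY, pvPOS6, pvNEG6, tabNeg6_get, show tabNeg6.size ≠ 0 from by decide]
  by_cases h30 : key = "q9g"
  · subst h30; unfold recode_py recode_py_alt
    rw [show recodeMap.get? "q9g" = some tabNeg6 from by
      simp [recodeMap, PySem.Dict.ofList, PySem.Dict.update, List.foldl, PySem.Dict.get?_insert]]
    simp [pvDESC5, pvASC5, pvTHREE, pvBINARY, pvPOS6, pvNEG6, tabNeg6_get, show tabNeg6.size ≠ 0 from by decide]
  by_cases h31 : key = "q9i"
  · subst h31; unfold recode_py recode_py_alt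
    rw [show recodeMap.get? "q9i" = some tabNeg6 from by
      simp [recodeMap, PySem.Dict.ofList, PySem.Dict.update, List.foldl, PySem.Dict.get?_insert]]
    simp [pvDESC5, pvASC5, pvTHREE, pvBINARY, pvPOS6, pvNEG6, tabNeg6_get, show tabNeg6.size ≠ 0 from by decide]
  by_cases h32 : key = "q10"
  · subst h32; unfold recode_py recode_py_alt
    rw [show recodeMap.get? "q10" = some tabAsc5 from by
      simp [recodeMap, PySem.Dict.ofList, PySem.Dict.update, List.foldl, PySem.Dict.get?_insert]]
    simp [pvDESC5, pvASC5, tabAsc5_get, show tabAsc5.size ≠ 0 from by decide]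
  by_cases h33 : key = "q11a"
  · subst h33; unfold recode_py recode_py_alt
    rw [show recodeMap.get? "q11a" = some tabAsc5 from by
      simp [recodeMap, PySem.Dict.ofList, PySem.Dict.update, List.foldl, PySem.Dict.get?_insert]]
    simp [pvDESC5, pvASC5, tabAsc5_get, show tabAsc5.size ≠ 0 from by decide]
  by_cases h34 : key = "q11c"
  · subst h34; unfold recode_py recode_py_alt
    rw [show recodeMap.get? "q11c" = some tabAsc5 from by
      simp [recodeMap, PySem.Dict.ofList, PySem.Dict.update, List.foldl, PySem.Dict.get?_insert]]
    simp [pvDESC5, pvASC5, tabAsc5_get, show tabAsc5.size ≠ 0 from by decide]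
  by_cases h35 : key = "q11b"
  · subst h35; unfold recode_py recode_py_alt
    rw [show recodeMap.get? "q11b" = some tabDesc5 from by
      simp [recodeMap, PySem.Dict.ofList, PySem.Dict.update, List.foldl, PySem.Dict.get?_insert]]
    simp [pvDESC5, tabDesc5_get, show tabDesc5.size ≠ 0 from by decide]
  by_cases h36 : key = "q11d"
  · subst h36; unfold recode_py recode_py_alt
    rw [show recodeMap.get? "q11d" = some tabDesc5 from by
      simp [recodeMap, PySem.Dict.ofList, PySem.Dict.update, List.foldl]]
    simp [pvDESC5, tabDesc5_get, show tabDesc5.size ≠ 0 from by decide]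
  unfold recode_py recode_py_alt
  rw [show recodeMap.get? key = none from by
    simp [recodeMap, PySem.Dict.ofList, PySem.Dict.update, List.foldl, PySem.Dict.get?_insert, PySem.Dict.get?_empty, h1, h2, h3, h4, h5, h6, h7, h8, h9, h10, h11, h12, h13, h14, h15, h16, h17, h18, h19, h20, h21, h22, h23, h24, h25, h26, h27, h28, h29, h30, h31, h32, h33, h34, h35, h36]]
  simp [pvDESC5, pvASC5, pvTHREE, pvBINARY, pvPOS6, pvNEG6, h1, h2, h3, h4, h5, h6, h7, h8, h9, h10, h11, h12, h13, h14, h15, h16, h17, h18, h19, h20, h21, h22, h23, h24, h25, h26, h27, h28, h29, h30, h31, h32, h33, h34, h35, h36]
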